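-- pv_equiv track=rewrite | github.com/k-sriram/advent-of-code | 2024/day22.py | part1
-- ===== SOURCE A (Python) =====
-- def parse(inp: str) -> list[int]:
--     return [int(line) for line in inp.splitlines()]
--
-- def get_next_secret(num: int) -> int:
--     num = ((num * 64) ^ num) % 16777216
--     num = ((num // 32) ^ num) % 16777216
--     num = ((num * 2048) ^ num) % 16777216
--     return num
--
-- def part1(inp: str) -> int:
--     nums = parse(inp)
--     total = 0
--     for num in nums:
--         for _ in range(2000):
--             num = get_next_secret(num)
--         total += num
--     return total
-- ===== SOURCE B (Python) =====
-- MOD = 16777216  # 2**24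
--
--
-- def _step(num: int) -> int:
--     num = ((num * 64) ^ num) % MOD
--     num = ((num // 32) ^ num) % MOD
--     num = ((num * 2048) ^ num) % MOD
--     return num
--
--
-- def _mat_vec(m: list[int], v: int) -> int:
--     # apply a GF(2) 24x24 matrix (list of 24 column masks) to a 24-bit vector
--     out = 0
--     for i in range(24):
--         if (v >> i) & 1:
--             out ^= m[i]
--     return out
--
--
-- def _mat_mul(a: list[int], b: list[int]) -> list[int]:
--     # columns of the composition a∘b
--     return [_mat_vec(a, b[i]) for i in range(24)]
--
--
-- def _mat_pow(m: list[int], e: int) -> list[int]: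
--     r = [1 << i for i in range(24)]  # identity
--     while e:
--         if e & 1:
--             r = _mat_mul(r, m)
--         m = _mat_mul(m, m)
--         e >>= 1
--     return r
--
--
-- def part1(inp: str) -> int:
--     # The step map is linear over GF(2) on 24-bit values, so its 2000-fold
--     # iterate is the 2000th power of its bit matrix, computed once by
--     # repeated squaring and then applied to each seed directly.
--     m = _mat_pow([_step(1 << i) for i in range(24)], 2000)
--     nums = [int(line) for line in inp.splitlines()]
--     return sum(_mat_vec(m, n % MOD) for n in nums)
-- ===== Notes on version B (the rewrite author's own statement) =====
-- stated objective: faster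
-- what changed: Replaces the 2000-iteration inner loop per seed by a GF(2) linear-algebra precomputation: the step map is linear over GF(2) on 24-bit values, so its 24x24 bit matrix is raised to the 2000th power once by repeated squaring and then applied to each seed as a single matrix-vector product.
import Mathlib
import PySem

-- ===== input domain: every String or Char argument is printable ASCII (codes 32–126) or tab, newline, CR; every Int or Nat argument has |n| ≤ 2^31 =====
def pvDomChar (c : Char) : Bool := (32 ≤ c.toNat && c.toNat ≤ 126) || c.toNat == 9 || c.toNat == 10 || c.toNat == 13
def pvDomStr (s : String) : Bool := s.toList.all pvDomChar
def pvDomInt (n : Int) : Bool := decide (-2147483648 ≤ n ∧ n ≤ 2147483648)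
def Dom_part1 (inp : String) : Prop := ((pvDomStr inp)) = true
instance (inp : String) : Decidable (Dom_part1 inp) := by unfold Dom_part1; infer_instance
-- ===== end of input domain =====

-- B replaces the per-seed 2000-step loop by one GF(2) 24x24 bit-matrix power (repeated
-- squaring) applied once per seed; objective: faster (asymptotically fewer step evaluations).


-- ===== PORT A =====
-- parse: [int(line) for line in inp.splitlines()] (the getD 0 default is unreachable under
-- Pre_part1); shared by both ports because Source B contains the identical comprehension
def parsePart1 (inp : String) : List Int :=
  (PySem.Str.splitlines inp).map (fun l => (PySem.Int.ofStr? l).getD 0)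

def getNextSecret (num : Int) : Int :=
  let n1 := PySem.Int.mod (PySem.Int.bxor (num * 64) num) 16777216
  let n2 := PySem.Int.mod (PySem.Int.bxor (PySem.Int.floordiv n1 32) n1) 16777216
  PySem.Int.mod (PySem.Int.bxor (n2 * 2048) n2) 16777216

def part1 (inp : String) : Int :=
  (parsePart1 inp).foldl
    (fun total num =>
      total + (PySem.List.pyRange 0 2000 1).foldl (fun n _ => getNextSecret n) num)
    0

-- ===== PORT B =====
-- Source B's _step: all its values are nonnegative (< 2**24 after each %), so Nat is exact here
def stepN (num : Nat) : Nat :=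
  let n1 := ((num * 64) ^^^ num) % 16777216
  let n2 := ((n1 / 32) ^^^ n1) % 16777216
  ((n2 * 2048) ^^^ n2) % 16777216

-- Source B's _mat_vec: out = 0; for i in range(24): if (v >> i) & 1: out ^= m[i]
def matVec (m : List Nat) (v : Nat) : Nat :=
  (List.range 24).foldl (fun out i => if (v >>> i) &&& 1 == 1 then out ^^^ m.getD i 0 else out) 0

-- Source B's _mat_mul (m[i] is in-range under all uses, so getD's default is unreachable)
def matMul (a b : List Nat) : List Nat :=
  (List.range 24).map (fun i => matVec a (b.getD i 0))

-- Source B's while-loop in _mat_pow: e & 1 → e % 2 = 1, e >>= 1 → e / 2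
def matPowGo (r m : List Nat) (e : Nat) : List Nat :=
  if e = 0 then r
  else matPowGo (if e % 2 = 1 then matMul r m else r) (matMul m m) (e / 2)
termination_by e
decreasing_by omega

def matPow (m : List Nat) (e : Nat) : List Nat :=
  matPowGo ((List.range 24).map fun i => 1 <<< i) m e

def part1_alt (inp : String) : Int :=
  let m2000 := matPow ((List.range 24).map fun i => stepN (1 <<< i)) 2000
  (parsePart1 inp).foldl
    (fun t n => t + ((matVec m2000 ((PySem.Int.mod n 16777216).toNat) : Nat) : Int)) 0

-- ===== PRECONDITION & SPEC =====
-- Pre_ excludes exactly the inputs where int(line) raises ValueError in A (and in B).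
def Pre_part1 (inp : String) : Prop :=
  ((PySem.Str.splitlines inp).all (fun l => (PySem.Int.ofStr? l).isSome)) = true
instance (inp : String) : Decidable (Pre_part1 inp) := by unfold Pre_part1; infer_instance
def pvWitness_part1 : String := "1\n10\n100\n2024"

def Spec_part1 (inp : String) (out : Int) : Prop := out = part1_alt inp
instance (inp : String) (out : Int) : Decidable (Spec_part1 inp out) := by unfold Spec_part1; infer_instance

-- ===== CLAIM (what is proved, stated in full; the proofs are below) =====
def Claim_equal_part1 : Prop := ∀ (inp : String), Dom_part1 inp → Pre_part1 inp → Spec_part1 inp (part1 inp)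

-- ===== LEMMAS AND PROOFS =====

/-- low 24 bits of a Python int (the value of `a % 16777216`). -/
def lb (a : Int) : Nat := (a % 16777216).toNat

/-- Two's-complement bit `i` of an arbitrary Python int. -/
def ibit (a : Int) (i : Nat) : Bool :=
  if 0 ≤ a then a.toNat.testBit i else !((-a - 1).toNat.testBit i)

theorem posPow2 (n : Nat) : 0 < 2 ^ n := Nat.two_pow_pos n

/-- `m` is the GF(2) bit matrix of `g` (columns = images of the basis), `g` 24-bit-closed. -/
def Good (m : List Nat) (g : Nat → Nat) : Prop :=
  (∀ x y, g (x ^^^ y) = g x ^^^ g y) ∧ (∀ v, v < 2 ^ 24 → g v < 2 ^ 24) ∧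
    (∀ i, i < 24 → m.getD i 0 = g (2 ^ i))

theorem lin_zero {g : Nat → Nat} (h : ∀ x y, g (x ^^^ y) = g x ^^^ g y) : g 0 = 0 := by
  have := h 0 0; simp at this; omega

theorem stepN_lt (x : Nat) : stepN x < 16777216 := by
  unfold stepN; dsimp only; omega


theorem compl_testBit (k : Nat) : ∀ m i, m < 2 ^ k → i < k →
    (2 ^ k - 1 - m).testBit i = !(m.testBit i) := by
  induction k with
  | zero => intro m i _ hi; omega
  | succ k ih =>
      intro m i hm hi
      cases i with
      | zero =>
          simp only [Nat.testBit_zero]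
          have h2 : 2 ^ (k + 1) = 2 * 2 ^ k := by ring
          have : (2 ^ (k + 1) - 1 - m) % 2 = 1 - m % 2 := by omega
          rw [this]
          rcases Nat.mod_two_eq_zero_or_one m with h | h <;> simp [h]
      | succ i =>
          rw [Nat.testBit_succ, Nat.testBit_succ]
          have h2 : 2 ^ (k + 1) = 2 * 2 ^ k := by ring
          have hdiv : (2 ^ (k + 1) - 1 - m) / 2 = 2 ^ k - 1 - m / 2 := by omega
          rw [hdiv]
          exact ih (m / 2) i (by omega) (by omega)

theorem onesLow_testBit (j : Nat) : ∀ n i,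
    (n * 2 ^ j + (2 ^ j - 1)).testBit i = (decide (i < j) || n.testBit (i - j)) := by
  induction j with
  | zero => intro n i; simp
  | succ j ih =>
      intro n i
      cases i with
      | zero =>
          simp only [Nat.testBit_zero]
          have h2 : n * 2 ^ (j + 1) = 2 * (n * 2 ^ j) := by ring
          have h3 : 2 ^ (j + 1) = 2 * 2 ^ j := by ring
          have : (n * 2 ^ (j + 1) + (2 ^ (j + 1) - 1)) % 2 = 1 := by
            have := posPow2 j
            omega
          simp [this]
      | succ i =>
          rw [Nat.testBit_succ]
          have h2 : n * 2 ^ (j + 1) = 2 * (n * 2 ^ j) := by ring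
          have h3 : 2 ^ (j + 1) = 2 * 2 ^ j := by ring
          have hdiv : (n * 2 ^ (j + 1) + (2 ^ (j + 1) - 1)) / 2 = n * 2 ^ j + (2 ^ j - 1) := by
            have := posPow2 j
            omega
          rw [hdiv, ih]
          simp only [Nat.succ_sub_succ]
          congr 1
          rcases Nat.lt_or_ge i j with h | h
          · simp [h, Nat.succ_lt_succ h]
          · simp [Nat.not_lt.mpr h, Nat.not_lt.mpr (Nat.succ_le_succ h)]

theorem lb_testBit (a : Int) (i : Nat) (hi : i < 24) : (lb a).testBit i = ibit a i := by
  unfold lb ibit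
  by_cases h : 0 ≤ a
  · have : (a % 16777216).toNat = a.toNat % 2 ^ 24 := by omega
    rw [this, Nat.testBit_mod_two_pow]
    simp [h, hi]
  · have hn : (a % 16777216).toNat = 2 ^ 24 - 1 - (-a - 1).toNat % 2 ^ 24 := by omega
    rw [hn, compl_testBit 24 _ i (by omega) hi, Nat.testBit_mod_two_pow]
    simp [h, hi]

theorem ibit_bxor (a b : Int) (i : Nat) :
    ibit (PySem.Int.bxor a b) i = (ibit a i ^^ ibit b i) := by
  by_cases ha : (0:Int) ≤ a <;> by_cases hb : (0:Int) ≤ b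
  · rw [PySem.Int.bxor_of_nonneg ha hb]
    simp [ibit, ha, hb, Nat.testBit_xor]
  · have hv : PySem.Int.bxor a b = -((a.toNat ^^^ (-b - 1).toNat : Nat) : Int) - 1 := by
      unfold PySem.Int.bxor; rw [if_pos ha, if_neg (by omega)]
    have hc := Int.natCast_nonneg (a.toNat ^^^ (-b - 1).toNat)
    rw [hv]
    simp only [ibit, if_neg (by omega : ¬ (0:Int) ≤ -((a.toNat ^^^ (-b - 1).toNat : Nat) : Int) - 1),
      if_pos ha, if_neg (by omega : ¬ (0:Int) ≤ b)]
    have h2 : (-(-((a.toNat ^^^ (-b - 1).toNat : Nat) : Int) - 1) - 1).toNat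
        = a.toNat ^^^ (-b - 1).toNat := by omega
    rw [h2, Nat.testBit_xor]
    cases a.toNat.testBit i <;> cases (-b - 1).toNat.testBit i <;> rfl
  · have hv : PySem.Int.bxor a b = -(((-a - 1).toNat ^^^ b.toNat : Nat) : Int) - 1 := by
      unfold PySem.Int.bxor; rw [if_neg (by omega), if_pos hb]
    have hc := Int.natCast_nonneg ((-a - 1).toNat ^^^ b.toNat)
    rw [hv]
    simp only [ibit, if_neg (by omega : ¬ (0:Int) ≤ -(((-a - 1).toNat ^^^ b.toNat : Nat) : Int) - 1),
      if_pos hb, if_neg (by omega : ¬ (0:Int) ≤ a)]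
    have h2 : (-(-(((-a - 1).toNat ^^^ b.toNat : Nat) : Int) - 1) - 1).toNat
        = (-a - 1).toNat ^^^ b.toNat := by omega
    rw [h2, Nat.testBit_xor]
    cases (-a - 1).toNat.testBit i <;> cases b.toNat.testBit i <;> rfl
  · have hv : PySem.Int.bxor a b = (((-a - 1).toNat ^^^ (-b - 1).toNat : Nat) : Int) := by
      unfold PySem.Int.bxor; rw [if_neg (by omega), if_neg (by omega)]
    have hc := Int.natCast_nonneg ((-a - 1).toNat ^^^ (-b - 1).toNat)
    rw [hv]
    simp only [ibit, if_pos hc, if_neg (by omega : ¬ (0:Int) ≤ a), if_neg (by omega : ¬ (0:Int) ≤ b),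
      Int.toNat_natCast]
    rw [Nat.testBit_xor]
    cases (-a - 1).toNat.testBit i <;> cases (-b - 1).toNat.testBit i <;> rfl

theorem ibit_mul64 (a : Int) (i : Nat) :
    ibit (a * 64) i = (decide (6 ≤ i) && ibit a (i - 6)) := by
  unfold ibit
  by_cases h : 0 ≤ a
  · have h64 : 0 ≤ a * 64 := by omega
    have : (a * 64).toNat = a.toNat <<< 6 := by rw [Nat.shiftLeft_eq]; norm_num; omega
    rw [this, Nat.testBit_shiftLeft]
    simp [h, h64, ge_iff_le]
  · have h64 : ¬ 0 ≤ a * 64 := by omega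
    have : (-(a * 64) - 1).toNat = (-a - 1).toNat * 2 ^ 6 + (2 ^ 6 - 1) := by norm_num; omega
    rw [if_neg h64, this, onesLow_testBit]
    simp only [if_neg h]
    by_cases h6 : 6 ≤ i <;> simp [Nat.lt_of_not_le, *]

theorem lb_lt (a : Int) : lb a < 2 ^ 24 := by unfold lb; omega

theorem tb_hi {n i : Nat} (hn : n < 2 ^ 24) (hi : 24 ≤ i) : n.testBit i = false :=
  Nat.testBit_eq_false_of_lt (lt_of_lt_of_le hn (Nat.pow_le_pow_right (by norm_num) hi))

theorem stage1_eq (a : Int) :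
    PySem.Int.mod (PySem.Int.bxor (a * 64) a) 16777216
      = ((((lb a) * 64) ^^^ (lb a)) % 16777216 : Nat) := by
  rw [PySem.Int.mod_eq_emod_of_pos (by norm_num)]
  have h1 : PySem.Int.bxor (a * 64) a % 16777216 = ((lb (PySem.Int.bxor (a * 64) a) : Nat) : Int) := by
    unfold lb; omega
  rw [h1]
  congr 1
  apply Nat.eq_of_testBit_eq
  intro i
  by_cases hi : i < 24
  · have hm : ((lb a * 64) ^^^ lb a) % 16777216 = ((lb a * 64) ^^^ lb a) % 2 ^ 24 := by norm_num
    rw [lb_testBit _ _ hi, ibit_bxor, ibit_mul64, hm, Nat.testBit_mod_two_pow,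
      Nat.testBit_xor]
    have hsh : (lb a * 64).testBit i = (decide (i ≥ 6) && (lb a).testBit (i - 6)) := by
      have h : lb a * 64 = lb a <<< 6 := by rw [Nat.shiftLeft_eq]
      rw [h]
      exact Nat.testBit_shiftLeft _
    rw [hsh]
    by_cases h6 : 6 ≤ i
    · simp [hi, h6, ge_iff_le, lb_testBit _ _ (by omega : i - 6 < 24), lb_testBit _ _ hi]
    · simp [hi, h6, ge_iff_le, lb_testBit _ _ hi]
  · rw [tb_hi (lb_lt _) (by omega), tb_hi (by norm_num [Nat.mod_lt] : ((lb a * 64) ^^^ lb a) % 16777216 < 2 ^ 24) (by omega)]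

theorem xor_mul_pow (x y j : Nat) : (x ^^^ y) * 2 ^ j = (x * 2 ^ j) ^^^ (y * 2 ^ j) := by
  have e : ∀ z : Nat, z * 2 ^ j = z <<< j := fun z => (Nat.shiftLeft_eq z j).symm
  rw [e, e, e]
  apply Nat.eq_of_testBit_eq
  intro i
  simp [Nat.testBit_shiftLeft, Nat.testBit_xor, Bool.and_xor_distrib_left]

theorem xor_div_pow (x y j : Nat) : (x ^^^ y) / 2 ^ j = (x / 2 ^ j) ^^^ (y / 2 ^ j) := by
  have e : ∀ z : Nat, z / 2 ^ j = z >>> j := fun z => (Nat.shiftRight_eq_div_pow z j).symm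
  rw [e, e, e]
  apply Nat.eq_of_testBit_eq
  intro i
  simp [Nat.testBit_shiftRight, Nat.testBit_xor]

theorem xor_mod_pow (x y j : Nat) : (x ^^^ y) % 2 ^ j = (x % 2 ^ j) ^^^ (y % 2 ^ j) := by
  apply Nat.eq_of_testBit_eq
  intro i
  simp [Nat.testBit_mod_two_pow, Nat.testBit_xor, Bool.and_xor_distrib_left]

theorem stage_lin (f : Nat → Nat) (hf : ∀ u v, f (u ^^^ v) = f u ^^^ f v) (u v : Nat) :
    (f (u ^^^ v) ^^^ (u ^^^ v)) % 16777216
      = ((f u ^^^ u) % 16777216) ^^^ ((f v ^^^ v) % 16777216) := by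
  have h24 : (16777216 : Nat) = 2 ^ 24 := by norm_num
  rw [hf, h24, ← xor_mod_pow]
  congr 1
  apply Nat.eq_of_testBit_eq
  intro i
  simp only [Nat.testBit_xor]
  cases (f u).testBit i <;> cases (f v).testBit i <;> cases u.testBit i <;> cases v.testBit i <;> rfl

theorem mul64_lin : ∀ u v : Nat, (u ^^^ v) * 64 = u * 64 ^^^ v * 64 := by
  intro u v; have h := xor_mul_pow u v 6; norm_num at h; exact h

theorem div32_lin : ∀ u v : Nat, (u ^^^ v) / 32 = u / 32 ^^^ v / 32 := by
  intro u v; have h := xor_div_pow u v 5; norm_num at h; exact h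

theorem mul2048_lin : ∀ u v : Nat, (u ^^^ v) * 2048 = u * 2048 ^^^ v * 2048 := by
  intro u v; have h := xor_mul_pow u v 11; norm_num at h; exact h

theorem stepN_linear (x y : Nat) : stepN (x ^^^ y) = stepN x ^^^ stepN y := by
  unfold stepN
  dsimp only
  rw [stage_lin (· * 64) mul64_lin x y,
      stage_lin (· / 32) div32_lin ((x * 64 ^^^ x) % 16777216) ((y * 64 ^^^ y) % 16777216),
      stage_lin (· * 2048) mul2048_lin]

theorem bitCond (v k : Nat) : ((v >>> k) &&& 1 == 1) = v.testBit k := by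
  rw [Nat.testBit_eq_decide_div_mod_eq, Nat.and_one_is_mod, Nat.shiftRight_eq_div_pow]
  by_cases h : v / 2 ^ k % 2 = 1 <;> simp [h]

theorem mod_succ_pow (v k : Nat) :
    v % 2 ^ (k + 1) = if v.testBit k then (v % 2 ^ k) ^^^ 2 ^ k else v % 2 ^ k := by
  split
  case isTrue h =>
    apply Nat.eq_of_testBit_eq
    intro i
    rw [Nat.testBit_mod_two_pow, Nat.testBit_xor, Nat.testBit_mod_two_pow, Nat.testBit_two_pow]
    rcases Nat.lt_trichotomy i k with hik | hik | hik
    · simp [hik, (show i < k + 1 by omega), (show ¬ k = i by omega)]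
    · subst hik; simp [h, (show i < i + 1 by omega)]
    · simp [(show ¬ i < k + 1 by omega), (show ¬ i < k by omega), (show ¬ k = i by omega)]
  case isFalse h =>
    apply Nat.eq_of_testBit_eq
    intro i
    rw [Nat.testBit_mod_two_pow, Nat.testBit_mod_two_pow]
    rcases Nat.lt_trichotomy i k with hik | hik | hik
    · simp [hik, (show i < k + 1 by omega)]
    · subst hik; simp [h, (show i < i + 1 by omega)]
    · simp [(show ¬ i < k + 1 by omega), (show ¬ i < k by omega)]

theorem matVec_aux {m : List Nat} {g : Nat → Nat}
    (hlin : ∀ x y, g (x ^^^ y) = g x ^^^ g y)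
    (hcols : ∀ i, i < 24 → m.getD i 0 = g (2 ^ i)) :
    ∀ k, k ≤ 24 → ∀ acc v,
      (List.range k).foldl (fun out i => if (v >>> i) &&& 1 == 1 then out ^^^ m.getD i 0 else out) acc
        = acc ^^^ g (v % 2 ^ k) := by
  intro k
  induction k with
  | zero => intro _ acc v; simp [Nat.mod_one, lin_zero hlin]
  | succ k ih =>
      intro hk acc v
      rw [List.range_succ, List.foldl_append, ih (by omega)]
      simp only [List.foldl_cons, List.foldl_nil, bitCond, mod_succ_pow]
      by_cases hb : v.testBit k
      · rw [if_pos hb, if_pos hb, hcols k (by omega), hlin, Nat.xor_assoc]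
      · rw [if_neg hb, if_neg hb]

theorem matVec_eq {m : List Nat} {g : Nat → Nat} (hg : Good m g) {v : Nat} (hv : v < 2 ^ 24) :
    matVec m v = g v := by
  unfold matVec
  rw [matVec_aux hg.1 hg.2.2 24 (by omega), Nat.mod_eq_of_lt hv, Nat.zero_xor]

theorem matMul_good {a b : List Nat} {f g : Nat → Nat} (ha : Good a f) (hb : Good b g) :
    Good (matMul a b) (fun v => f (g v)) := by
  refine ⟨fun x y => by show f (g (x ^^^ y)) = f (g x) ^^^ f (g y); rw [hb.1, ha.1], fun v hv => ha.2.1 _ (hb.2.1 _ hv), fun i hi => ?_⟩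
  unfold matMul
  have hget : ((List.range 24).map (fun i => matVec a (b.getD i 0))).getD i 0
      = matVec a (b.getD i 0) := by
    rw [List.getD_eq_getElem?_getD]
    simp [List.getElem?_map, List.getElem?_range hi]
  rw [hget, hb.2.2 i hi,
    matVec_eq ha (hb.2.1 _ (Nat.pow_lt_pow_right (by norm_num) hi))]

theorem matPowGo_good : ∀ e (r m : List Nat) (f g : Nat → Nat), Good r f → Good m g →
    Good (matPowGo r m e) (fun v => f (g^[e] v)) := by
  intro e
  induction e using Nat.strong_induction_on with
  | _ e ih =>
      intro r m f g hr hm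
      rw [matPowGo]
      by_cases he : e = 0
      · subst he; simpa using hr
      · rw [if_neg he]
        have hsq : Good (matMul m m) (fun v => g (g v)) := matMul_good hm hm
        by_cases hp : e % 2 = 1
        · rw [if_pos hp]
          have h := ih (e / 2) (by omega) _ _ _ _ (matMul_good hr hm) hsq
          have hfun : (fun v => (fun w => f (g w)) ((fun w => g (g w))^[e / 2] v))
              = fun v => f (g^[e] v) := by
            funext v
            have h2 : (fun w => g (g w)) = g^[2] := rfl
            show f (g ((fun w => g (g w))^[e / 2] v)) = f (g^[e] v)
            rw [h2, ← Function.iterate_mul]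
            conv_rhs => rw [show e = 2 * (e / 2) + 1 by omega, Function.iterate_succ_apply']
          rwa [hfun] at h
        · rw [if_neg hp]
          have h := ih (e / 2) (by omega) _ _ _ _ hr hsq
          have hfun : (fun v => f ((fun w => g (g w))^[e / 2] v)) = fun v => f (g^[e] v) := by
            funext v
            have h2 : (fun w => g (g w)) = g^[2] := rfl
            show f ((fun w => g (g w))^[e / 2] v) = f (g^[e] v)
            rw [h2, ← Function.iterate_mul]
            conv_rhs => rw [show e = 2 * (e / 2) by omega]
          rwa [hfun] at h

theorem matPow_good {m : List Nat} {g : Nat → Nat} (hm : Good m g) (e : Nat) :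
    Good (matPow m e) (g^[e]) := by
  have hid : Good ((List.range 24).map fun i => 1 <<< i) (fun v => v) := by
    refine ⟨fun x y => rfl, fun v hv => hv, fun i hi => ?_⟩
    rw [List.getD_eq_getElem?_getD]
    simp [List.getElem?_map, List.getElem?_range hi, Nat.one_shiftLeft]
  have h := matPowGo_good e _ m _ g hid hm
  exact h

theorem castStage2 (x : Nat) :
    PySem.Int.mod (PySem.Int.bxor (PySem.Int.floordiv (x : Int) 32) (x : Int)) 16777216
      = (((x / 32) ^^^ x) % 16777216 : Nat) := by
  have h1 : PySem.Int.floordiv (x : Int) 32 = ((x / 32 : Nat) : Int) := by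
    exact_mod_cast PySem.Int.floordiv_natCast x 32
  rw [h1, PySem.Int.bxor_natCast]
  exact_mod_cast PySem.Int.mod_natCast _ 16777216

theorem castStage3 (x : Nat) :
    PySem.Int.mod (PySem.Int.bxor ((x : Int) * 2048) (x : Int)) 16777216
      = (((x * 2048) ^^^ x) % 16777216 : Nat) := by
  have h1 : ((x : Int) * 2048) = ((x * 2048 : Nat) : Int) := by push_cast; ring
  rw [h1, PySem.Int.bxor_natCast]
  exact_mod_cast PySem.Int.mod_natCast _ 16777216

theorem getNextSecret_eq (a : Int) : getNextSecret a = (stepN (lb a) : Int) := by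
  unfold getNextSecret stepN
  dsimp only
  rw [stage1_eq, castStage2, castStage3]

theorem lb_natCast (x : Nat) (hx : x < 16777216) : lb (x : Int) = x := by
  unfold lb; omega

theorem iterate_stepN_lt (t x : Nat) : stepN^[t + 1] x < 16777216 := by
  rw [Function.iterate_succ_apply']; exact stepN_lt _

theorem iterate_cast (t : Nat) : ∀ a : Int,
    getNextSecret^[t + 1] a = (stepN^[t + 1] (lb a) : Int) := by
  induction t with
  | zero => intro a; simpa using getNextSecret_eq a
  | succ t ih =>
      intro a
      rw [Function.iterate_succ_apply' getNextSecret, ih a, getNextSecret_eq,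
        lb_natCast _ (iterate_stepN_lt t (lb a)), ← Function.iterate_succ_apply' stepN]

theorem foldl_const_iterate (f : Int → Int) : ∀ (l : List Int) (x : Int),
    l.foldl (fun n _ => f n) x = f^[l.length] x := by
  intro l
  induction l with
  | nil => simp
  | cons a rest ih => intro x; simp [List.foldl_cons, ih, Function.iterate_succ_apply]

set_option maxRecDepth 10000 in
theorem pyRange_2000_length : (PySem.List.pyRange 0 2000 1).length = 2000 := by decide

theorem foldl_add_congr (F G : Int → Int) : ∀ (l : List Int) (a : Int),
    (∀ n ∈ l, F n = G n) → l.foldl (fun t n => t + F n) a = l.foldl (fun t n => t + G n) a := by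
  intro l
  induction l with
  | nil => simp
  | cons x rest ih =>
      intro a h
      simp only [List.foldl_cons, h x (List.mem_cons_self ..)]
      exact ih _ (fun n hn => h n (List.mem_cons_of_mem _ hn))

theorem cols_good : Good ((List.range 24).map fun i => stepN (1 <<< i)) stepN := by
  refine ⟨stepN_linear, fun v _ => by simpa using stepN_lt v, fun i hi => ?_⟩
  rw [List.getD_eq_getElem?_getD]
  simp [List.getElem?_map, List.getElem?_range hi, Nat.one_shiftLeft]

theorem lb_mod (n : Int) : (PySem.Int.mod n 16777216).toNat = lb n := by
  rw [PySem.Int.mod_eq_emod_of_pos (by norm_num)]; rfl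

-- ===== VERDICT (by name: the statement is the Claim_ definition above) =====
theorem part1_spec : Claim_equal_part1 := by
  intro inp _ _
  unfold Spec_part1 part1 part1_alt
  dsimp only
  refine foldl_add_congr _ _ _ _ ?_
  intro n _
  rw [foldl_const_iterate, pyRange_2000_length, show (2000 : Nat) = 1999 + 1 from rfl,
    iterate_cast, lb_mod, matVec_eq (matPow_good cols_good (1999 + 1)) (lb_lt n)]
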